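-- pv_equiv track=rewrite | github.com/jsherbert36/HerbertJS | Mr Carroll Classwork/Cipher Homework/The Enigma Cipher.py | Plugboard
-- ===== SOURCE A (Python) =====
-- def Plugboard(Text,Letters):    #takes a list as input
-- 	for i in range(len(Text)):  #swaps letters
-- 		for j in range(len(Letters)):
-- 			if Text[i] == Letters[j][0]:
-- 				Text[i] = Letters[j][1]
-- 			elif Text[i] == Letters[j][1]:
-- 				Text[i] = Letters[j][0]
-- 			#endif
-- 		#next j
-- 	#next i
-- 	return Text  #returns it as a list
-- ===== SOURCE B (Python) =====
-- def Plugboard(Text, Letters):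
--     # Build a substitution table once: identity on every letter appearing in a pair,
--     # then compose the transpositions in order; then a single pass over Text.
--     table = {}
--     for a, b in Letters:
--         table.setdefault(a, a)
--         table.setdefault(b, b)
--     for a, b in Letters:
--         for k in table:
--             if table[k] == a:
--                 table[k] = b
--             elif table[k] == b:
--                 table[k] = a
--     for i in range(len(Text)):
--         Text[i] = table.get(Text[i], Text[i])
--     return Text
-- ===== Notes on version B (the rewrite author's own statement) =====
-- stated objective: faster
-- what changed: B precomputes one substitution table by composing the swap pairs in order over a dict keyed by the letters appearing in pairs, then rewrites Text in a single pass, instead of rescanning the whole pair list for every character of Text.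
import Mathlib
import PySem

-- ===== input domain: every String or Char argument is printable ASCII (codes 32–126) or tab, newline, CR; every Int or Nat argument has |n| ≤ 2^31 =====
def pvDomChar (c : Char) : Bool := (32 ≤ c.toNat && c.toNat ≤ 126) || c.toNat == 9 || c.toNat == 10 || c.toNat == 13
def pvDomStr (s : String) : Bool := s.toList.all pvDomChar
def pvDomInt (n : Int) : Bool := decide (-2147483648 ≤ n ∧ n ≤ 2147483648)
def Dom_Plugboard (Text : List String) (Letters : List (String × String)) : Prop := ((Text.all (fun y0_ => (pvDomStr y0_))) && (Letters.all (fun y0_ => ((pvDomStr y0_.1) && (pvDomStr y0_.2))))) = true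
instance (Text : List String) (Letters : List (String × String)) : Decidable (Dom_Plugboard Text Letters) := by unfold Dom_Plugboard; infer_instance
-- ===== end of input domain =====

-- B precomputes one substitution table (pairs composed in order) and makes a single pass over Text;
-- both versions mutate Text in place in Python — the equivalence proved here is about the return value.

-- ===== PORT A =====
def Plugboard (Text : List String) (Letters : List (String × String)) : List String :=
  (PySem.List.pyRange 0 (Text.length : Int) 1).foldl (fun acc i =>
    (PySem.List.pyRange 0 (Letters.length : Int) 1).foldl (fun acc2 j =>
      let p := PySem.List.pyGetD Letters j ("", "")
      if PySem.List.pyGetD acc2 i "" = p.1 then PySem.List.pySetD acc2 i p.2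
      else if PySem.List.pyGetD acc2 i "" = p.2 then PySem.List.pySetD acc2 i p.1
      else acc2) acc) Text

-- ===== PORT B =====
def Plugboard_alt (Text : List String) (Letters : List (String × String)) : List String :=
  let table0 : PySem.Dict String String :=
    Letters.foldl (fun d p => (d.setdefault p.1 p.1).setdefault p.2 p.2) PySem.Dict.empty
  let table : PySem.Dict String String :=
    Letters.foldl (fun d p =>
      d.keys.foldl (fun d2 k =>
        if d2.getD k "" = p.1 then d2.insert k p.2
        else if d2.getD k "" = p.2 then d2.insert k p.1
        else d2) d) table0
  (PySem.List.pyRange 0 (Text.length : Int) 1).foldl (fun acc i =>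
    let x := PySem.List.pyGetD acc i ""
    PySem.List.pySetD acc i (table.getD x x)) Text

-- ===== PRECONDITION & SPEC =====
def Spec_Plugboard (Text : List String) (Letters : List (String × String)) (out : List String) : Prop := out = Plugboard_alt Text Letters
instance (Text : List String) (Letters : List (String × String)) (out : List String) : Decidable (Spec_Plugboard Text Letters out) := by unfold Spec_Plugboard; infer_instance

-- ===== CLAIM =====
def Claim_equal_Plugboard : Prop := ∀ (Text : List String) (Letters : List (String × String)), Dom_Plugboard Text Letters → Spec_Plugboard Text Letters (Plugboard Text Letters)

-- ===== LEMMAS AND PROOFS =====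

-- the effect of one plugboard pair on one letter, and of the whole pair list (left to right)
def pvSwap (p : String × String) (x : String) : String :=
  if x = p.1 then p.2 else if x = p.2 then p.1 else x

def pvSubst (L : List (String × String)) (x : String) : String :=
  L.foldl (fun c p => pvSwap p c) x

theorem pvSubst_cons (p : String × String) (L : List (String × String)) (x : String) :
    pvSubst (p :: L) x = pvSubst L (pvSwap p x) := rfl

theorem pvSubst_of_not_mem (L : List (String × String)) (x : String)
    (h : ∀ p ∈ L, x ≠ p.1 ∧ x ≠ p.2) : pvSubst L x = x := by
  induction L with
  | nil => rfl
  | cons p L ih =>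
    have hp := h p (by simp)
    rw [pvSubst_cons, pvSwap, if_neg hp.1, if_neg hp.2]
    exact ih (fun q hq => h q (by simp [hq]))

-- A's inner loop over the pairs, acting on index n of acc, is a single set with pvSubst
theorem inner_eq (L : List (String × String)) (acc : List String) (n : Nat) (h : n < acc.length) :
    L.foldl (fun acc2 p =>
      if PySem.List.pyGetD acc2 (n : Int) "" = p.1 then PySem.List.pySetD acc2 (n : Int) p.2
      else if PySem.List.pyGetD acc2 (n : Int) "" = p.2 then PySem.List.pySetD acc2 (n : Int) p.1
      else acc2) acc
    = acc.set n (pvSubst L acc[n]) := by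
  induction L generalizing acc with
  | nil => simp [pvSubst]
  | cons p L ih =>
    have hget : PySem.List.pyGetD acc (n : Int) "" = acc[n] := by
      simp [PySem.List.pyGetD_natCast, List.getD_eq_getElem?_getD, h]
    rw [List.foldl_cons, pvSubst_cons, pvSwap]
    by_cases h1 : acc[n] = p.1
    · rw [hget, if_pos h1, PySem.List.pySetD_natCast, ih _ (by simpa using h)]
      simp [h, h1]
    · rw [hget, if_neg h1]
      by_cases h2 : acc[n] = p.2
      · rw [if_pos h2, PySem.List.pySetD_natCast, ih _ (by simpa using h),
            if_neg h1, if_pos h2]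
        simp [List.getElem_set, h, List.set_set]
      · rw [if_neg h2, ih _ h, if_neg h1, if_neg h2]

-- a loop 'for i in range(len(xs)): xs[i] = f(xs[i])' is a map, proved over a prefix
theorem fold_set_prefix (f : String → String) (xs : List String) (n : Nat)
    (hn : n ≤ xs.length)
    (g : List String → Int → List String)
    (hg : ∀ (acc : List String) (k : Nat), acc.length = xs.length → (hk : k < acc.length) →
      g acc (k : Int) = acc.set k (f acc[k])) :
    (PySem.List.pyRange 0 (n : Int) 1).foldl g xs
      = (xs.take n).map f ++ xs.drop n := by
  induction n with
  | zero => simp [PySem.List.pyRange_one_eq_nil]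
  | succ m ih =>
    have hm : m ≤ xs.length := Nat.le_of_succ_le hn
    have hmlt : m < xs.length := hn
    rw [show ((m + 1 : Nat) : Int) = (m : Int) + 1 by push_cast; ring,
        PySem.List.pyRange_one_succ_right (by positivity), List.foldl_append, ih hm]
    have hlen : (List.map f (xs.take m) ++ xs.drop m).length = xs.length := by
      simp [Nat.min_eq_left hm]
      omega
    have hklt : m < (List.map f (xs.take m) ++ xs.drop m).length := by omega
    have haccm : (List.map f (xs.take m) ++ xs.drop m)[m]'hklt = xs[m] := by
      rw [List.getElem_append_right (by simp [Nat.min_eq_left hm])]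
      simp [Nat.min_eq_left hm]
    simp only [List.foldl_cons, List.foldl_nil]
    rw [hg _ m hlen hklt, haccm, List.set_append]
    have hlt : (List.map f (xs.take m)).length = m := by simp [Nat.min_eq_left hm]
    rw [if_neg (by omega), hlt, Nat.sub_self, List.drop_eq_getElem_cons hmlt]
    have htake : xs.take (m + 1) = xs.take m ++ [xs[m]] := by
      rw [List.take_add_one]
      simp [List.getElem?_eq_getElem hmlt]
    rw [htake, List.map_append, List.set_cons_zero]
    simp

-- ===== B-side dict lemmas =====

def pvTable0 (Letters : List (String × String)) : PySem.Dict String String :=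
  Letters.foldl (fun d p => (d.setdefault p.1 p.1).setdefault p.2 p.2) PySem.Dict.empty

def pvStep (p : String × String) (d : PySem.Dict String String) : PySem.Dict String String :=
  d.keys.foldl (fun d2 k =>
    if d2.getD k "" = p.1 then d2.insert k p.2
    else if d2.getD k "" = p.2 then d2.insert k p.1
    else d2) d

def pvTable (Letters : List (String × String)) : PySem.Dict String String :=
  Letters.foldl (fun d p => pvStep p d) (pvTable0 Letters)

theorem setdefault_id (d : PySem.Dict String String)
    (hd : ∀ x v, d.get? x = some v → v = x) (k : String) :
    ∀ x v, (d.setdefault k k).get? x = some v → v = x := by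
  intro x v hv
  by_cases hx : x = k
  · subst hx
    rw [PySem.Dict.get?_setdefault_self] at hv
    cases hy : d.get? x with
    | none => simp [hy] at hv; exact hv.symm
    | some w => simp [hy] at hv; rw [← hv]; exact hd _ _ hy
  · rw [PySem.Dict.get?_setdefault_of_ne _ _ hx] at hv
    exact hd x v hv

-- table0: identity map on exactly the letters that appear in some pair
theorem table0_aux (L : List (String × String)) (d : PySem.Dict String String)
    (hd : ∀ x v, d.get? x = some v → v = x) :
    ∀ x, (L.foldl (fun d p => (d.setdefault p.1 p.1).setdefault p.2 p.2) d).get? x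
      = if (∃ p ∈ L, x = p.1 ∨ x = p.2) ∨ (d.get? x).isSome then some x else none := by
  induction L generalizing d with
  | nil =>
    intro x
    simp only [List.foldl_nil, List.not_mem_nil, false_and, exists_false, false_or]
    cases hx : d.get? x with
    | none => simp
    | some v => simp [hd x v hx]
  | cons p L ih =>
    intro x
    have hd' := setdefault_id _ (setdefault_id d hd p.1) p.2
    rw [List.foldl_cons, ih _ hd']
    have hiff : ((∃ q ∈ L, x = q.1 ∨ x = q.2) ∨
        (((d.setdefault p.1 p.1).setdefault p.2 p.2).get? x).isSome)
        ↔ ((∃ q ∈ p :: L, x = q.1 ∨ x = q.2) ∨ (d.get? x).isSome) := by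
      constructor
      · rintro (⟨q, hq, hxq⟩ | hs)
        · exact Or.inl ⟨q, List.mem_cons_of_mem _ hq, hxq⟩
        · by_cases h2 : x = p.2
          · exact Or.inl ⟨p, List.mem_cons_self, Or.inr h2⟩
          · rw [PySem.Dict.get?_setdefault_of_ne _ _ h2] at hs
            by_cases h1 : x = p.1
            · exact Or.inl ⟨p, List.mem_cons_self, Or.inl h1⟩
            · rw [PySem.Dict.get?_setdefault_of_ne _ _ h1] at hs
              exact Or.inr hs
      · rintro (⟨q, hq, hxq⟩ | hs)
        · rcases List.mem_cons.mp hq with rfl | hq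
          · rcases hxq with h1 | h2
            · by_cases h2 : x = q.2
              · subst h2; right; rw [PySem.Dict.get?_setdefault_self]; simp
              · right
                rw [PySem.Dict.get?_setdefault_of_ne _ _ h2, h1,
                    PySem.Dict.get?_setdefault_self]
                simp
            · subst h2; right; rw [PySem.Dict.get?_setdefault_self]; simp
          · exact Or.inl ⟨q, hq, hxq⟩
        · right
          by_cases h2 : x = p.2
          · subst h2; rw [PySem.Dict.get?_setdefault_self]; simp
          · rw [PySem.Dict.get?_setdefault_of_ne _ _ h2]
            by_cases h1 : x = p.1
            · subst h1; rw [PySem.Dict.get?_setdefault_self]; simp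
            · rw [PySem.Dict.get?_setdefault_of_ne _ _ h1]; exact hs
    simp only [hiff]

theorem table0_get? (Letters : List (String × String)) (x : String) :
    (pvTable0 Letters).get? x
      = if ∃ p ∈ Letters, x = p.1 ∨ x = p.2 then some x else none := by
  have h := table0_aux Letters PySem.Dict.empty (by intro x v h; simp [PySem.Dict.get?_empty] at h) x
  simp only [PySem.Dict.get?_empty, Option.isSome_none, Bool.false_eq_true, or_false] at h
  exact h

theorem table0_nodup (Letters : List (String × String)) : (pvTable0 Letters).keys.Nodup := by
  unfold pvTable0
  induction Letters using List.reverseRecOn with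
  | nil => exact PySem.Dict.nodup_keys_empty
  | append_singleton L p ih =>
    rw [List.foldl_append, List.foldl_cons, List.foldl_nil]
    set d := L.foldl (fun d p => (d.setdefault p.1 p.1).setdefault p.2 p.2) PySem.Dict.empty
    have h1 : (d.setdefault p.1 p.1).keys.Nodup := by
      by_cases h : d.contains p.1
      · rw [PySem.Dict.setdefault_of_contains _ _ h]; exact ih
      · rw [PySem.Dict.setdefault_of_not_contains _ _ (by simpa using h)]
        exact PySem.Dict.nodup_keys_insert _ _ _ ih
    by_cases h : (d.setdefault p.1 p.1).contains p.2
    · rw [PySem.Dict.setdefault_of_contains _ _ h]; exact h1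
    · rw [PySem.Dict.setdefault_of_not_contains _ _ (by simpa using h)]
      exact PySem.Dict.nodup_keys_insert _ _ _ h1

-- one pass of B's second loop applies pvSwap p to every stored value
theorem step_inner (p : String × String) (ks : List String)
    (d : PySem.Dict String String) (hnd : ks.Nodup)
    (hin : ∀ k ∈ ks, (d.get? k).isSome) :
    ∀ x, (ks.foldl (fun d2 k =>
        if d2.getD k "" = p.1 then d2.insert k p.2
        else if d2.getD k "" = p.2 then d2.insert k p.1
        else d2) d).get? x
      = if x ∈ ks then (d.get? x).map (pvSwap p) else d.get? x := by
  induction ks generalizing d with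
  | nil => intro x; simp
  | cons k ks ih =>
    intro x
    obtain ⟨v, hv⟩ := Option.isSome_iff_exists.mp (hin k (by simp))
    have hgetD : d.getD k "" = v := PySem.Dict.getD_of_get?_eq_some _ _ hv
    have hone : ∀ y, ((if d.getD k "" = p.1 then d.insert k p.2
        else if d.getD k "" = p.2 then d.insert k p.1 else d) : PySem.Dict String String).get? y
        = if y = k then some (pvSwap p v) else d.get? y := by
      intro y
      simp only [hgetD, pvSwap]
      by_cases h1 : v = p.1
      · rw [if_pos h1, if_pos h1, PySem.Dict.get?_insert]
      · rw [if_neg h1, if_neg h1]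
        by_cases h2 : v = p.2
        · rw [if_pos h2, if_pos h2, PySem.Dict.get?_insert]
        · rw [if_neg h2, if_neg h2]
          by_cases hy : y = k
          · subst hy; rw [if_pos rfl, hv]
          · rw [if_neg hy]
    set d' := (if d.getD k "" = p.1 then d.insert k p.2
        else if d.getD k "" = p.2 then d.insert k p.1 else d) with hd'
    have hin' : ∀ j ∈ ks, (d'.get? j).isSome := by
      intro j hj
      rw [hone j]
      by_cases hjk : j = k
      · simp [hjk]
      · rw [if_neg hjk]; exact hin j (by simp [hj])
    rw [List.foldl_cons, ← hd', ih d' (List.Nodup.of_cons hnd) hin']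
    by_cases hx : x ∈ ks
    · rw [if_pos hx, if_pos (by simp [hx]), hone x,
          if_neg (by rintro rfl; exact (List.nodup_cons.mp hnd).1 hx)]
    · rw [if_neg hx]
      by_cases hxk : x = k
      · subst hxk
        rw [hone x, if_pos rfl, if_pos (by simp), hv]
        rfl
      · rw [hone x, if_neg hxk, if_neg (by simp [hx, hxk])]

theorem step_get? (p : String × String) (d : PySem.Dict String String)
    (hnd : d.keys.Nodup) :
    ∀ x, (pvStep p d).get? x = (d.get? x).map (pvSwap p) := by
  intro x
  have hin : ∀ k ∈ d.keys, (d.get? k).isSome := by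
    intro k hk
    rw [← PySem.Dict.contains_eq_isSome_get?]
    exact (PySem.Dict.contains_iff_mem_keys _ _).mpr hk
  rw [pvStep, step_inner p d.keys d hnd hin x]
  by_cases hx : x ∈ d.keys
  · rw [if_pos hx]
  · rw [if_neg hx]
    have : d.get? x = none := by
      rw [PySem.Dict.get?_eq_none_iff_not_mem_keys]; exact hx
    simp [this]

theorem inner_keys (p : String × String) (ks : List String)
    (d : PySem.Dict String String) (hin : ∀ k ∈ ks, d.contains k = true) :
    (ks.foldl (fun d2 k =>
        if d2.getD k "" = p.1 then d2.insert k p.2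
        else if d2.getD k "" = p.2 then d2.insert k p.1
        else d2) d).keys = d.keys := by
  induction ks generalizing d with
  | nil => rfl
  | cons k ks ih =>
    have hk := hin k (by simp)
    have hkeys : ∀ v, (d.insert k v).keys = d.keys := fun v =>
      PySem.Dict.keys_insert_of_contains d v hk
    have hone : ((if d.getD k "" = p.1 then d.insert k p.2
        else if d.getD k "" = p.2 then d.insert k p.1 else d) : PySem.Dict String String).keys
        = d.keys := by
      split_ifs <;> simp [hkeys]
    set d' := (if d.getD k "" = p.1 then d.insert k p.2
        else if d.getD k "" = p.2 then d.insert k p.1 else d) with hd'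
    have hin' : ∀ j ∈ ks, d'.contains j = true := by
      intro j hj
      have := hin j (by simp [hj])
      rw [hd']
      split_ifs <;> simp [PySem.Dict.contains_insert, this]
    rw [List.foldl_cons, ← hd', ih d' hin', hone]

theorem step_keys (p : String × String) (d : PySem.Dict String String)
    (hnd : d.keys.Nodup) : (pvStep p d).keys = d.keys := by
  exact inner_keys p d.keys d (fun k hk => (PySem.Dict.contains_iff_mem_keys _ _).mpr hk)

theorem step_nodup (p : String × String) (d : PySem.Dict String String)
    (hnd : d.keys.Nodup) : (pvStep p d).keys.Nodup := by
  rw [step_keys p d hnd]; exact hnd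

theorem second_loop (L : List (String × String)) (d : PySem.Dict String String)
    (hnd : d.keys.Nodup) :
    ∀ x, (L.foldl (fun d p => pvStep p d) d).get? x = (d.get? x).map (pvSubst L) := by
  induction L generalizing d with
  | nil =>
    intro x; cases h : d.get? x <;> simp [pvSubst, h]
  | cons p L ih =>
    intro x
    rw [List.foldl_cons, ih (pvStep p d) (step_nodup p d hnd), step_get? p d hnd]
    cases d.get? x <;> simp [pvSubst_cons]

theorem table_getD (Letters : List (String × String)) (x : String) :
    (pvTable Letters).getD x x = pvSubst Letters x := by
  rw [pvTable, PySem.Dict.getD_eq_get?_getD,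
      second_loop Letters (pvTable0 Letters) (table0_nodup Letters) x, table0_get?]
  by_cases h : ∃ p ∈ Letters, x = p.1 ∨ x = p.2
  · rw [if_pos h]; rfl
  · rw [if_neg h]
    simp only [Option.map_none, Option.getD_none]
    exact (pvSubst_of_not_mem Letters x (by
      intro p hp
      push_neg at h
      exact h p hp)).symm

-- both ports are Text.map (pvSubst Letters)
theorem plugboard_eq_map (Text : List String) (Letters : List (String × String)) :
    Plugboard Text Letters = Text.map (pvSubst Letters) := by
  have h := fold_set_prefix (pvSubst Letters) Text Text.length le_rfl
    (fun acc i =>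
      (PySem.List.pyRange 0 (Letters.length : Int) 1).foldl (fun acc2 j =>
        let p := PySem.List.pyGetD Letters j ("", "")
        if PySem.List.pyGetD acc2 i "" = p.1 then PySem.List.pySetD acc2 i p.2
        else if PySem.List.pyGetD acc2 i "" = p.2 then PySem.List.pySetD acc2 i p.1
        else acc2) acc)
    (by
      intro acc k _ hk
      exact (PySem.List.foldl_pyRange_zero_pyGetD' Letters ("", "")
        (fun acc2 p =>
          if PySem.List.pyGetD acc2 (k : Int) "" = p.1 then PySem.List.pySetD acc2 (k : Int) p.2
          else if PySem.List.pyGetD acc2 (k : Int) "" = p.2 then PySem.List.pySetD acc2 (k : Int) p.1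
          else acc2) acc).trans (inner_eq Letters acc k hk))
  simpa [Plugboard] using h

theorem plugboard_alt_eq_map (Text : List String) (Letters : List (String × String)) :
    Plugboard_alt Text Letters = Text.map (pvSubst Letters) := by
  have hrfl : Plugboard_alt Text Letters
      = (PySem.List.pyRange 0 (Text.length : Int) 1).foldl (fun acc i =>
          PySem.List.pySetD acc i
            ((pvTable Letters).getD (PySem.List.pyGetD acc i "") (PySem.List.pyGetD acc i ""))) Text := rfl
  have h := fold_set_prefix (fun x => (pvTable Letters).getD x x) Text Text.length le_rfl
    (fun acc i => PySem.List.pySetD acc i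
      ((pvTable Letters).getD (PySem.List.pyGetD acc i "") (PySem.List.pyGetD acc i "")))
    (by
      intro acc k _ hk
      have hget : PySem.List.pyGetD acc (k : Int) "" = acc[k] := by
        simp [PySem.List.pyGetD_natCast, List.getD_eq_getElem?_getD, hk]
      beta_reduce
      rw [hget, PySem.List.pySetD_natCast])
  rw [hrfl, h]
  simp only [List.take_length, List.drop_length, List.append_nil]
  exact List.map_congr_left (fun x _ => table_getD Letters x)

-- ===== VERDICT =====
theorem Plugboard_spec : Claim_equal_Plugboard := by
  intro Text Letters _
  unfold Spec_Plugboard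
  rw [plugboard_eq_map, plugboard_alt_eq_map]
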